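-- pv_equiv track=rewrite | github.com/jiyoungbkim/Algorithms-DataStructure | Python100Quiz/061-070.py | order_check
-- ===== SOURCE A (Python) =====
-- def order_check(b, rule):
--     tmp = rule.index(rule[0])
--     for text in b:
--         if text in rule:
--             if tmp > rule.index(text):
--                 return '불가능'
--             tmp = rule.index(text)
--     return '가능'
-- ===== SOURCE B (Python) =====
-- def order_check(b, rule):
--     letters = [ch for ch in b if ch in rule]
--     return '가능' if sorted(letters, key=rule.index) == letters else '불가능'
-- ===== Notes on version B (the rewrite author's own statement) =====
-- stated objective: alternative
-- what changed: Replaces A's single scan with a running last-seen index and early return by filtering b to rule letters, stably sorting them by rule position, and comparing the sorted list with the original list.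
import Mathlib
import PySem

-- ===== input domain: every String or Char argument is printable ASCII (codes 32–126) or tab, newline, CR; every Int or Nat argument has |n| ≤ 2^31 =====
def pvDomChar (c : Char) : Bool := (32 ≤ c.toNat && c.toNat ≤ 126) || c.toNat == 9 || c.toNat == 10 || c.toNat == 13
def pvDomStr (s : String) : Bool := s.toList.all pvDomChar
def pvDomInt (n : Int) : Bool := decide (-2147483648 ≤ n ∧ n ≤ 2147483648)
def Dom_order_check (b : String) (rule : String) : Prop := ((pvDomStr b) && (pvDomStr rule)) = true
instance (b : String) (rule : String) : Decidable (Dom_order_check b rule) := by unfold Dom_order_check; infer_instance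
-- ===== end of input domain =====

-- B filters b to the letters of rule, stably sorts them by rule position, and compares the sorted
-- list with the original (alternative algorithm: sort-and-compare instead of A's running-index scan).


-- ===== PORT A =====
-- rule.index(text): first index of text in rule (used only under 'text in rule')
def pvIdx (rule : List Char) (t : Char) : Nat := List.idxOf t rule

-- the for-loop over b with running state tmp and early return
def orderCheckGo (rule : List Char) : List Char → Nat → String
  | [], _ => "가능"
  | t :: ts, tmp =>
      if rule.contains t then
        if tmp > pvIdx rule t then "불가능"
        else orderCheckGo rule ts (pvIdx rule t)
      else orderCheckGo rule ts tmp

def order_check (b : String) (rule : String) : String :=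
  let rs := rule.toList
  orderCheckGo rs b.toList (pvIdx rs (rs.headD default))

-- ===== PORT B =====
-- letters = [ch for ch in b if ch in rule]; '가능' iff sorted(letters, key=rule.index) == letters
def order_check_alt (b : String) (rule : String) : String :=
  let rs := rule.toList
  let letters := b.toList.filter (fun t => rs.contains t)
  if PySem.List.sorted letters (fun t => pvIdx rs t) false = letters then "가능" else "불가능"

-- ===== PRECONDITION & SPEC =====
-- Python A evaluates rule[0], which raises IndexError on the empty rule.
def Pre_order_check (b : String) (rule : String) : Prop := rule.toList ≠ []
instance (b : String) (rule : String) : Decidable (Pre_order_check b rule) := by unfold Pre_order_check; infer_instance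
def pvWitness_order_check : String × String := ("dba", "abc")

def Spec_order_check (b : String) (rule : String) (out : String) : Prop := out = order_check_alt b rule
instance (b : String) (rule : String) (out : String) : Decidable (Spec_order_check b rule out) := by unfold Spec_order_check; infer_instance

-- ===== CLAIM (what is proved, stated in full; the proofs are below) =====
def Claim_equal_order_check : Prop := ∀ (b : String) (rule : String), Dom_order_check b rule → Pre_order_check b rule → Spec_order_check b rule (order_check b rule)

-- ===== LEMMAS AND PROOFS =====
-- adjacent non-decreasing (helper used only in the proofs)
def pvNondec : List Nat → Bool
  | a :: c :: l => decide (a ≤ c) && pvNondec (c :: l)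
  | _ => true

lemma orderCheckGo_eq (rule ts : List Char) (tmp : Nat) :
    orderCheckGo rule ts tmp
      = (if pvNondec (tmp :: (ts.filter (fun t => rule.contains t)).map (pvIdx rule))
         then "가능" else "불가능") := by
  induction ts generalizing tmp with
  | nil => simp [orderCheckGo, pvNondec]
  | cons t ts ih =>
    by_cases h : rule.contains t
    · simp only [orderCheckGo, h, if_true, List.filter_cons, List.map_cons, pvNondec]
      by_cases h2 : tmp > pvIdx rule t
      · have : ¬ (tmp ≤ pvIdx rule t) := by omega
        simp [h2, this]
      · have : tmp ≤ pvIdx rule t := by omega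
        simp [this, ih]
    · simp only [orderCheckGo, h, List.filter_cons]
      rw [if_neg (by simp [h])]
      exact ih tmp

lemma pvNondec_zero_cons (l : List Nat) : pvNondec (0 :: l) = pvNondec l := by
  cases l with
  | nil => rfl
  | cons a l => simp [pvNondec]

lemma pvNondec_iff_chain (l : List Nat) : pvNondec l = true ↔ l.IsChain (· ≤ ·) := by
  induction l with
  | nil => simpa [pvNondec] using List.IsChain.nil
  | cons a l ih =>
    cases l with
    | nil => simpa [pvNondec] using List.isChain_singleton a
    | cons c l =>
      simp only [pvNondec, Bool.and_eq_true, decide_eq_true_eq, List.isChain_cons_cons]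
      exact and_congr Iff.rfl ih

lemma pvNondec_map_iff (letters : List Char) (key : Char → Nat) :
    pvNondec (letters.map key) = true ↔ letters.Pairwise (fun a b => key a ≤ key b) := by
  rw [pvNondec_iff_chain, List.isChain_map]
  exact @List.isChain_iff_pairwise _ (fun a b => key a ≤ key b) letters
    ⟨fun h1 h2 => le_trans h1 h2⟩

lemma sorted_eq_self_iff (letters : List Char) (key : Char → Nat) :
    PySem.List.sorted letters key false = letters ↔
      letters.Pairwise (fun a b => key a ≤ key b) := by
  constructor
  · intro h
    have := PySem.List.sorted_pairwise (κ := Nat) letters key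
    rwa [h] at this
  · exact PySem.List.sorted_eq_self_of_pairwise letters key

lemma headD_idx_zero (rs : List Char) (h : rs ≠ []) : pvIdx rs (rs.headD default) = 0 := by
  cases rs with
  | nil => exact absurd rfl h
  | cons c l => simp [pvIdx]

-- ===== VERDICT (by name: the statement is the Claim_ definition above) =====
theorem order_check_spec : Claim_equal_order_check := by
  intro b rule _ hpre
  unfold Spec_order_check order_check order_check_alt
  rw [orderCheckGo_eq, headD_idx_zero _ hpre, pvNondec_zero_cons]
  by_cases h : pvNondec ((b.toList.filter (fun t => rule.toList.contains t)).map (pvIdx rule.toList)) = true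
  · rw [if_pos h, if_pos ((sorted_eq_self_iff _ _).mpr ((pvNondec_map_iff _ _).mp h))]
  · rw [if_neg h, if_neg (fun hs => h ((pvNondec_map_iff _ _).mpr ((sorted_eq_self_iff _ _).mp hs)))]
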